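-- pv_equiv track=rewrite | github.com/PidgeyUsedGust/synthasizer | synthasizer/transformation.py | _has_pattern
-- ===== SOURCE A (Python) =====
-- from typing import List, Set, Tuple, Any, Union, Optional, Type, Iterable
--
-- def _has_pattern(l: List[Any]) -> bool:
--     """Check if a list consists of a pattern."""
--     for i in range(2, len(l) // 2 + 1):
--         if len(l) % i == 0:
--             p = l[:i]
--             n = len(l) // i
--             if p * n == l:
--                 return True
--     return False
-- ===== SOURCE B (Python) =====
-- def _has_pattern(l):
--     """Check if a list consists of a pattern.
--
--     Instead of scanning every candidate block size up to len(l)//2, walk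
--     divisors d only up to sqrt(len(l)) and test both blocks of the
--     complementary pair (d, len(l)//d)."""
--     n = len(l)
--     d = 2
--     while d * d <= n:
--         if n % d == 0:
--             if l[:d] * (n // d) == l or l[:n // d] * d == l:
--                 return True
--         d += 1
--     return False
-- ===== Notes on version B (the rewrite author's own statement) =====
-- stated objective: alternative
-- what changed: A scans every candidate block size i from 2 to n//2 testing the divisors it meets; B walks d only up to sqrt(n) and, for each divisor d found, tests both blocks of the complementary pair (d, n//d).
import Mathlib
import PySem

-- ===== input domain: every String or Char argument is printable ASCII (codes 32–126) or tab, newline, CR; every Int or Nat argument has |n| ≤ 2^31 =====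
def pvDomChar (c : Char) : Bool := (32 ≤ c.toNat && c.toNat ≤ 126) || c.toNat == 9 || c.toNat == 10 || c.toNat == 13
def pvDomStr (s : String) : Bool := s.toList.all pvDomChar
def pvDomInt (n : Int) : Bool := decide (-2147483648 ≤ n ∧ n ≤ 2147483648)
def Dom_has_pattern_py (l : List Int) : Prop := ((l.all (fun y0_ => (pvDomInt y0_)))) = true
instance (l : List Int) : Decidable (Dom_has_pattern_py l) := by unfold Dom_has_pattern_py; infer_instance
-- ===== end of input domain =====

-- B replaces A's scan of every block size up to len(l)//2 by a walk of the
-- divisor pairs (d, n//d) for d up to sqrt(n), testing both blocks of each pair.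

-- ===== PORT A =====
-- Python `p * k` for a list p and a nonnegative int k: k copies concatenated (exact).
def pyListMul (p : List Int) (k : Nat) : List Int := (List.replicate k p).flatten

-- the `for i in range(2, len(l)//2 + 1)` loop with early return
def loopA (l : List Int) (i : Nat) : Bool :=
  if _h : i ≤ l.length / 2 then
    if l.length % i == 0 && pyListMul (l.take i) (l.length / i) == l then true
    else loopA l (i + 1)
  else false
termination_by l.length / 2 + 1 - i
decreasing_by omega

def has_pattern_py (l : List Int) : Bool := loopA l 2

-- ===== PORT B =====
-- the `while d * d <= n` loop with early return
def loopB (l : List Int) (d : Nat) : Bool :=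
  if _h : d * d ≤ l.length then
    if l.length % d == 0 &&
        (pyListMul (l.take d) (l.length / d) == l
          || pyListMul (l.take (l.length / d)) d == l) then true
    else loopB l (d + 1)
  else false
termination_by l.length + 1 - d
decreasing_by
  have hd : d ≤ l.length := by
    rcases Nat.eq_zero_or_pos d with h0 | h1
    · omega
    · calc d = d * 1 := (Nat.mul_one d).symm
        _ ≤ d * d := Nat.mul_le_mul_left d h1
        _ ≤ l.length := _h
  omega

def has_pattern_py_alt (l : List Int) : Bool := loopB l 2

-- ===== PRECONDITION & SPEC =====
def Spec_has_pattern_py (l : List Int) (out : Bool) : Prop := out = has_pattern_py_alt l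
instance (l : List Int) (out : Bool) : Decidable (Spec_has_pattern_py l out) := by unfold Spec_has_pattern_py; infer_instance

-- ===== CLAIM (what is proved, stated in full; the proofs are below) =====
def Claim_equal_has_pattern_py : Prop := ∀ (l : List Int), Dom_has_pattern_py l → Spec_has_pattern_py l (has_pattern_py l)

-- ===== LEMMAS AND PROOFS =====

-- A's loop returns true iff some block size j in [i, n/2] passes A's check.
theorem loopA_iff (l : List Int) (i : Nat) :
    loopA l i = true ↔
      ∃ j, i ≤ j ∧ j ≤ l.length / 2 ∧ l.length % j = 0 ∧
        pyListMul (l.take j) (l.length / j) = l := by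
  fun_induction loopA l i with
  | case1 i h hc =>
    simp only [Bool.and_eq_true, beq_iff_eq] at hc
    refine iff_of_true rfl ?_
    exact ⟨i, le_refl i, h, hc.1, hc.2⟩
  | case2 i h hc ih =>
    rw [ih]
    simp only [Bool.and_eq_true, beq_iff_eq] at hc
    constructor
    · rintro ⟨j, hj1, hj2, hj3, hj4⟩; exact ⟨j, by omega, hj2, hj3, hj4⟩
    · rintro ⟨j, hj1, hj2, hj3, hj4⟩
      refine ⟨j, ?_, hj2, hj3, hj4⟩
      rcases Nat.eq_or_lt_of_le hj1 with rfl | h'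
      · exact absurd (And.intro hj3 hj4) hc
      · omega
  | case3 i h =>
    refine iff_of_false (by simp) ?_
    rintro ⟨j, hj1, hj2, _, _⟩; omega

-- B's loop returns true iff some divisor e ≥ d with e*e ≤ n passes one of B's two checks.
theorem loopB_iff (l : List Int) (d : Nat) :
    loopB l d = true ↔
      ∃ e, d ≤ e ∧ e * e ≤ l.length ∧ l.length % e = 0 ∧
        (pyListMul (l.take e) (l.length / e) = l ∨
          pyListMul (l.take (l.length / e)) e = l) := by
  fun_induction loopB l d with
  | case1 d h hc =>
    simp only [Bool.and_eq_true, Bool.or_eq_true, beq_iff_eq] at hc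
    refine iff_of_true rfl ?_
    exact ⟨d, le_refl d, h, hc.1, hc.2⟩
  | case2 d h hc ih =>
    rw [ih]
    simp only [Bool.and_eq_true, Bool.or_eq_true, beq_iff_eq] at hc
    constructor
    · rintro ⟨e, he1, he2, he3, he4⟩; exact ⟨e, by omega, he2, he3, he4⟩
    · rintro ⟨e, he1, he2, he3, he4⟩
      refine ⟨e, ?_, he2, he3, he4⟩
      rcases Nat.eq_or_lt_of_le he1 with rfl | h'
      · exact absurd (And.intro he3 he4) hc
      · omega
  | case3 d h =>
    refine iff_of_false (by simp) ?_
    rintro ⟨e, he1, he2, _, _⟩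
    exact h (le_trans (Nat.mul_le_mul he1 he1) he2)

theorem main_eq (l : List Int) : has_pattern_py l = has_pattern_py_alt l := by
  unfold has_pattern_py has_pattern_py_alt
  rw [Bool.eq_iff_iff, loopA_iff, loopB_iff]
  constructor
  · rintro ⟨j, hj2, hjh, hdvd, hchk⟩
    have hj0 : 0 < j := by omega
    have h2j : 2 * j ≤ l.length := by omega
    obtain ⟨k, hk⟩ : j ∣ l.length := Nat.dvd_of_mod_eq_zero hdvd
    have hdiv : l.length / j = k := by rw [hk]; exact Nat.mul_div_cancel_left k hj0
    by_cases hsq : j * j ≤ l.length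
    · exact ⟨j, hj2, hsq, hdvd, Or.inl hchk⟩
    · -- j exceeds the square root: its cofactor k answers for B
      have hk2 : 2 ≤ k := by
        have h' : j * 2 ≤ j * k := by omega
        exact Nat.le_of_mul_le_mul_left h' hj0
      have hkj : k < j := by
        have h' : j * k < j * j := by omega
        exact Nat.lt_of_mul_lt_mul_left h'
      have hkk : k * k ≤ l.length := by
        have h' : k * k ≤ k * j := Nat.mul_le_mul_left k (le_of_lt hkj)
        have h'' : k * j = j * k := Nat.mul_comm k j
        omega
      have hkdvd : l.length % k = 0 := by
        have h' : k ∣ l.length := ⟨j, by rw [hk]; ring⟩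
        exact Nat.mod_eq_zero_of_dvd h'
      have hdk : l.length / k = j := by
        rw [hk, Nat.mul_comm]; exact Nat.mul_div_cancel_left j (by omega)
      refine ⟨k, hk2, hkk, hkdvd, Or.inr ?_⟩
      rw [hdk]; rw [hdiv] at hchk; exact hchk
  · rintro ⟨e, he2, hee, hdvd, hchk⟩
    have he0 : 0 < e := by omega
    obtain ⟨k, hk⟩ : e ∣ l.length := Nat.dvd_of_mod_eq_zero hdvd
    have hdiv : l.length / e = k := by rw [hk]; exact Nat.mul_div_cancel_left k he0
    rcases hchk with h1 | h2
    · -- e itself is a block size A tries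
      refine ⟨e, he2, ?_, hdvd, h1⟩
      have h' : 2 * e ≤ e * e := by
        have := Nat.mul_le_mul_right e he2; omega
      omega
    · -- the cofactor k is a block size A tries
      have hek : e ≤ k := by
        have h' : e * e ≤ e * k := by omega
        exact Nat.le_of_mul_le_mul_left h' he0
      have hk2 : 2 ≤ k := by omega
      have hkh : k ≤ l.length / 2 := by
        have h' : 2 * k ≤ e * k := Nat.mul_le_mul_right k he2
        omega
      have hkdvd : l.length % k = 0 := by
        have h' : k ∣ l.length := ⟨e, by rw [hk]; ring⟩
        exact Nat.mod_eq_zero_of_dvd h'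
      have hdk : l.length / k = e := by
        rw [hk, Nat.mul_comm]; exact Nat.mul_div_cancel_left e (by omega)
      refine ⟨k, hk2, hkh, hkdvd, ?_⟩
      rw [hdk]; rw [hdiv] at h2; exact h2

-- ===== VERDICT (by name: the statement is the Claim_ definition above) =====
theorem has_pattern_py_spec : Claim_equal_has_pattern_py := by
  intro l _
  unfold Spec_has_pattern_py
  exact main_eq l
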